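-- pv_equiv track=rewrite | github.com/arnoringi/forritun | Final exam (2019)/isbn.py | check_int
-- ===== SOURCE A (Python) =====
-- POSITIONS = [1, 5, 11]  # Where the dashes are located
--
-- def check_int(isbn):
--     ''' Checks if correct digits are integers '''
--     temp_list = POSITIONS
--     index = 0
--
--     for digit in isbn.strip():
--         for position in temp_list:
--             if index == position:
--                 temp_list = temp_list[1:] # Remove first digit in temp_list
--                 break # Skip rest of for-loop
--             else:
--                 try:
--                     digit = int(digit)
--                     break # To prevent repetition
--                 except ValueError:
--                     return False
--         index += 1
--     return True
-- ===== SOURCE B (Python) =====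
-- POSITIONS = [1, 5, 11]  # Where the dashes are located
--
-- def check_int(isbn):
--     ''' Checks if correct digits are integers '''
--     s = isbn.strip()
--     return all(ch in "0123456789"
--                for i, ch in enumerate(s[:12]) if i not in POSITIONS)
-- ===== Notes on version B (the rewrite author's own statement) =====
-- stated objective: simpler
-- what changed: Replaces the nested loop over a shrinking temp_list that is popped as dash positions pass with a single comprehension over the first 12 characters that skips the fixed indices 1,5,11 and tests digit membership directly.
import Mathlib
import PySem

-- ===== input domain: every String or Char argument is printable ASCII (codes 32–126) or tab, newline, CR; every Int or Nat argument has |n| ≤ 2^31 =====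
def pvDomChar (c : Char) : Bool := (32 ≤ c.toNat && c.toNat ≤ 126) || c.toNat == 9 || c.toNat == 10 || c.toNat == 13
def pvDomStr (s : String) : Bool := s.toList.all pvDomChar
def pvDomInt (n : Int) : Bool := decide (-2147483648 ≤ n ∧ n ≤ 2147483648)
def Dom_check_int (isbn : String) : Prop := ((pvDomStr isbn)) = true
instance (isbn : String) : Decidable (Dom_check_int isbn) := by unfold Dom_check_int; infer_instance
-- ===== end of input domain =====

-- B replaces A's nested loop with a popped temp_list by one comprehension over the
-- first 12 characters that skips the fixed indices 1, 5, 11 (objective: simpler).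

-- ===== PORT A =====
-- A's for over isbn.strip(): state = (temp_list, index); the inner for over temp_list
-- only ever inspects its head (both branches break), so it is a match on temp_list
def checkIntLoop : List Char → List Int → Int → Bool
  | [], _, _ => true
  | d :: rest, temp, index =>
    match temp with
    | [] => checkIntLoop rest [] (index + 1)              -- inner loop has nothing to iterate
    | p :: ps =>
      if index = p then checkIntLoop rest ps (index + 1)  -- temp_list = temp_list[1:]; break
      else if (PySem.Int.ofChars? [d]).isSome             -- digit = int(digit) succeeds; break
        then checkIntLoop rest (p :: ps) (index + 1)
        else false                                        -- ValueError: return False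

def check_int (isbn : String) : Bool :=
  checkIntLoop (PySem.Str.strip isbn).toList [1, 5, 11] 0

-- ===== PORT B =====
def check_int_alt (isbn : String) : Bool :=
  (PySem.List.enumerate (PySem.List.slice (PySem.Str.strip isbn).toList none (some 12))).all
    (fun p => if p.1 = 1 ∨ p.1 = 5 ∨ p.1 = 11 then true
              else "0123456789".toList.contains p.2)

-- ===== PRECONDITION & SPEC =====
def Spec_check_int (isbn : String) (out : Bool) : Prop := out = check_int_alt isbn
instance (isbn : String) (out : Bool) : Decidable (Spec_check_int isbn out) := by unfold Spec_check_int; infer_instance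

-- ===== CLAIM (what is proved, stated in full; the proofs are below) =====
def Claim_equal_check_int : Prop := ∀ (isbn : String), Dom_check_int isbn → Spec_check_int isbn (check_int isbn)

-- ===== LEMMAS AND PROOFS =====

-- once temp_list is empty A checks nothing and returns True
lemma loop_nil_temp : ∀ (cs : List Char) (i : Int), checkIntLoop cs [] i = true := by
  intro cs
  induction cs with
  | nil => intro i; simp [checkIntLoop]
  | cons d ds ih => intro i; simp [checkIntLoop]; exact ih (i + 1)

-- int(ch) on a single domain (ASCII) character succeeds exactly when ch is a decimal digit
set_option maxRecDepth 16384 in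
lemma intOk_eq_digit (c : Char) (h : pvDomChar c = true) :
    (PySem.Int.ofChars? [c]).isSome = "0123456789".toList.contains c := by
  have key : ((List.range 127).map Char.ofNat).all
      (fun x => (PySem.Int.ofChars? [x]).isSome == "0123456789".toList.contains x) = true := by
    decide
  have hm : c ∈ (List.range 127).map Char.ofNat := by
    refine List.mem_map.2 ⟨c.toNat, List.mem_range.2 ?_, Char.ofNat_toNat c⟩
    simp [pvDomChar] at h; omega
  simpa using (List.all_eq_true.1 key) c hm

-- loop invariant: at index i, temp_list is the list of not-yet-passed dash positions,
-- and the rest of A's loop checks exactly B's predicate on the characters at indices i..11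
lemma loop_eq (cs : List Char) : ∀ (i : Nat), cs.all pvDomChar = true →
    checkIntLoop cs (List.dropWhile (fun p => decide (p < (i : Int))) [1, 5, 11]) i
      = (PySem.List.enumerate (cs.take (12 - i)) i).all
          (fun p => if p.1 = 1 ∨ p.1 = 5 ∨ p.1 = 11 then true
                    else "0123456789".toList.contains p.2) := by
  induction cs with
  | nil => intro i _; simp [checkIntLoop]
  | cons c cs ih =>
    intro i hall
    have hc : pvDomChar c = true := by simp [List.all_cons] at hall; exact hall.1
    have hcs : cs.all pvDomChar = true := by
      simp [List.all_cons] at hall; simp [List.all_eq_true]; exact hall.2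
    have hdig := intOk_eq_digit c hc
    by_cases hbig : 12 ≤ i
    · have hd : List.dropWhile (fun p => decide (p < (i : Int))) [1, 5, 11] = [] := by
        have h12 : (12 : Int) ≤ (i : Int) := by exact_mod_cast hbig
        rw [List.dropWhile_eq_nil_iff]
        intro x hx
        fin_cases hx <;> simp <;> omega
      have ht : 12 - i = 0 := by omega
      rw [hd, ht]
      simp
      exact loop_nil_temp (c :: cs) i
    · have hlt : i < 12 := by omega
      clear hbig
      interval_cases i <;>
        simp_all [checkIntLoop, List.dropWhile, PySem.List.enumerate_cons] <;>
        first
          | exact loop_nil_temp cs 12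
          | (first | simpa using ih 1 | simpa using ih 2 | simpa using ih 3 | simpa using ih 4 | simpa using ih 5 | simpa using ih 6 | simpa using ih 7 | simpa using ih 8 | simpa using ih 9 | simpa using ih 10 | simpa using ih 11 | simpa using ih 12)
          | (congr 1 <;> (first | rfl | simpa using ih 1 | simpa using ih 2 | simpa using ih 3 | simpa using ih 4 | simpa using ih 5 | simpa using ih 6 | simpa using ih 7 | simpa using ih 8 | simpa using ih 9 | simpa using ih 10 | simpa using ih 11 | simpa using ih 12))

-- stripping keeps every character of the string, so the domain bound survives strip()
lemma strip_all_dom (isbn : String) (h : pvDomStr isbn = true) :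
    (PySem.Str.strip isbn).toList.all pvDomChar = true := by
  have hsub : (PySem.Str.strip isbn).toList.Sublist isbn.toList := by
    rw [PySem.Str.toList_strip]
    unfold PySem.Chars.strip PySem.Chars.rstrip PySem.Chars.lstrip
    have h1 : (List.dropWhile PySem.Chars.isspace
          (List.dropWhile PySem.Chars.isspace isbn.toList).reverse).reverse.Sublist
        (List.dropWhile PySem.Chars.isspace isbn.toList) := by
      simpa using (List.dropWhile_sublist (p := PySem.Chars.isspace)
        (l := (List.dropWhile PySem.Chars.isspace isbn.toList).reverse)).reverse
    exact h1.trans (List.dropWhile_sublist _)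
  rw [List.all_eq_true] at *
  intro x hx
  exact (List.all_eq_true.1 h) x (hsub.subset hx)

-- ===== VERDICT (by name: the statement is the Claim_ definition above) =====
theorem check_int_spec : Claim_equal_check_int := by
  intro isbn hdom
  unfold Spec_check_int check_int check_int_alt
  have hall := strip_all_dom isbn hdom
  have h12 : PySem.List.slice (PySem.Str.strip isbn).toList none (some 12)
      = (PySem.Str.strip isbn).toList.take 12 := by
    rw [show ((12 : Int)) = ((12 : Nat) : Int) by norm_cast, PySem.List.slice_to_natCast]
  rw [h12]
  simpa using loop_eq (PySem.Str.strip isbn).toList 0 hall
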